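-- pv_equiv track=rewrite | github.com/Balaji5359/HackFusion_Project_BEnd | ui/app.py | _order_count_by_medicine
-- ===== SOURCE A (Python) =====
-- def _order_count_by_medicine(rows: list[dict]) -> dict[str, int]:
--     out: dict[str, int] = {}
--     for r in rows:
--         name = r.get("medicine_name")
--         if not name:
--             continue
--         out[name] = out.get(name, 0) + 1
--     return out
-- ===== SOURCE B (Python) =====
-- def _order_count_by_medicine(rows: list[dict]) -> dict[str, int]:
--     names = [r.get("medicine_name") for r in rows]
--     seen = []
--     for n in names:
--         if n and n not in seen:
--             seen.append(n)
--     return {n: names.count(n) for n in seen}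
-- ===== Notes on version B (the rewrite author's own statement) =====
-- stated objective: alternative
-- what changed: B replaces A's single-pass hash accumulation ('out[name] = out.get(name,0)+1') by a two-phase algorithm: project the name column once, collect the distinct truthy names in first-occurrence order, then count each distinct name with list.count.
import Mathlib
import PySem

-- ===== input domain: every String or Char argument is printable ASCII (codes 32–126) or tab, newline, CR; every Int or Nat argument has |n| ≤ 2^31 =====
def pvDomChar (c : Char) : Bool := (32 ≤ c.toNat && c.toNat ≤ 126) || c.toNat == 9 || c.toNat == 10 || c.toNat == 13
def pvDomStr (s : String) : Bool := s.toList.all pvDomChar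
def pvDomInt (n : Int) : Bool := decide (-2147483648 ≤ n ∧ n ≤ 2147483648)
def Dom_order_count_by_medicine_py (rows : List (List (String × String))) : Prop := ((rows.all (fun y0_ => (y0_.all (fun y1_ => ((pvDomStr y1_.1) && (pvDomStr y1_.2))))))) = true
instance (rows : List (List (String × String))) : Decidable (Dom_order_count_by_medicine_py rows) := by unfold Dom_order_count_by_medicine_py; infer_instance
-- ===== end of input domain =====

-- B counts by projecting the name column once, deduplicating in first-occurrence order
-- and counting each distinct name with list.count, instead of A's running hash accumulation (objective: alternative).


-- ===== PORT A =====
def order_count_by_medicine_py (rows : List (List (String × String))) : List (String × Int) :=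
  (rows.foldl (fun (out : PySem.Dict String Int) r =>
      match (PySem.Dict.mk r).get? "medicine_name" with
      | none => out
      | some name =>
          if name = "" then out
          else out.modify name 0 (· + 1))  -- Dict.modify IS Python's out[name] = out.get(name, 0) + 1
    PySem.Dict.empty).items

-- ===== PORT B =====
def order_count_by_medicine_py_alt (rows : List (List (String × String))) : List (String × Int) :=
  let names : List (Option String) := rows.map (fun r => (PySem.Dict.mk r).get? "medicine_name")
  let seen : List String := names.foldl (fun s n =>
      match n with
      | none => s
      | some x => if x = "" then s else if x ∈ s then s else s ++ [x]) []
  seen.map (fun n => (n, (names.count (some n) : Int)))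

-- ===== PRECONDITION & SPEC =====
def Spec_order_count_by_medicine_py (rows : List (List (String × String))) (out : List (String × Int)) : Prop := out = order_count_by_medicine_py_alt rows
instance (rows : List (List (String × String))) (out : List (String × Int)) : Decidable (Spec_order_count_by_medicine_py rows out) := by unfold Spec_order_count_by_medicine_py; infer_instance

-- ===== CLAIM (what is proved, stated in full; the proofs are below) =====
def Claim_equal_order_count_by_medicine_py : Prop := ∀ (rows : List (List (String × String))), Dom_order_count_by_medicine_py rows → Spec_order_count_by_medicine_py rows (order_count_by_medicine_py rows)

-- ===== LEMMAS AND PROOFS =====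

-- the falsy-name filter: keep a name only if present and non-empty
def pvKeep : Option String → Option String
  | none => none
  | some x => if x = "" then none else some x

-- a fold that skips falsy names is a fold over the filtered list (generic in the loop body g)
theorem pv_fold_filt {β : Type} (g : β → String → β) :
    ∀ (ns : List (Option String)) (b : β),
      ns.foldl (fun acc n =>
          match n with
          | none => acc
          | some x => if x = "" then acc else g acc x) b
        = (ns.filterMap pvKeep).foldl g b := by
  intro ns
  induction ns with
  | nil => intro b; rfl
  | cons a t ih =>
      intro b
      cases a with
      | none => simp [pvKeep, ih]
      | some x =>
          by_cases hx : x = "" <;> simp [pvKeep, hx, ih]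

-- counting a truthy name in the raw column equals counting it after the filter
theorem pv_count_filt (x : String) (hx : x ≠ "") :
    ∀ ns : List (Option String), ns.count (some x) = (ns.filterMap pvKeep).count x := by
  intro ns
  induction ns with
  | nil => rfl
  | cons a t ih =>
      cases a with
      | none => simpa [pvKeep, List.count_cons] using ih
      | some y =>
          by_cases hy : y = ""
          · subst hy
            simp [pvKeep, ih, Ne.symm hx]
          · simp [pvKeep, hy, List.count_cons, ih]

-- every surviving name is non-empty
theorem pv_mem_filt_ne (ns : List (Option String)) (x : String)
    (h : x ∈ ns.filterMap pvKeep) : x ≠ "" := by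
  rcases List.mem_filterMap.mp h with ⟨o, _, ho⟩
  cases o with
  | none => simp [pvKeep] at ho
  | some y =>
      by_cases hy : y = "" <;> simp [pvKeep, hy] at ho
      exact ho ▸ hy


-- the whole loop over rows: project the name, skip falsy ones, fold g over the survivors
theorem pv_fold_rows {β : Type} (g : β → String → β) :
    ∀ (rows : List (List (String × String))) (b : β),
      rows.foldl (fun acc r =>
          match (PySem.Dict.mk r).get? "medicine_name" with
          | none => acc
          | some x => if x = "" then acc else g acc x) b
        = ((rows.map (fun r => (PySem.Dict.mk r).get? "medicine_name")).filterMap pvKeep).foldl g b := by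
  intro rows
  induction rows with
  | nil => intro b; rfl
  | cons r t ih =>
      intro b
      cases h : (PySem.Dict.mk r).get? "medicine_name" with
      | none => simp [h, pvKeep, ih]
      | some x => by_cases hx : x = "" <;> simp [h, pvKeep, hx, ih]

theorem pv_equiv (rows : List (List (String × String))) :
    order_count_by_medicine_py rows = order_count_by_medicine_py_alt rows := by
  show (rows.foldl (fun (out : PySem.Dict String Int) r =>
      match (PySem.Dict.mk r).get? "medicine_name" with
      | none => out
      | some name => if name = "" then out else out.modify name 0 (· + 1))
    PySem.Dict.empty).items
    = ((rows.map (fun r => (PySem.Dict.mk r).get? "medicine_name")).foldl (fun s n =>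
          match n with
          | none => s
          | some x => if x = "" then s else if x ∈ s then s else s ++ [x]) []).map
        (fun n => (n, ((rows.map (fun r => (PySem.Dict.mk r).get? "medicine_name")).count (some n) : Int)))
  have hA := pv_fold_rows (g := fun (d : PySem.Dict String Int) x => d.modify x 0 (· + 1))
    rows PySem.Dict.empty
  rw [hA, ← PySem.Dict.counter_eq_foldl, PySem.Dict.items_counter]
  have hB := pv_fold_filt (g := fun (s : List String) x => if x ∈ s then s else s ++ [x])
    (rows.map (fun r => (PySem.Dict.mk r).get? "medicine_name")) []
  rw [hB]
  have hseen : ((rows.map (fun r => (PySem.Dict.mk r).get? "medicine_name")).filterMap pvKeep).foldl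
        (fun (s : List String) x => if x ∈ s then s else s ++ [x]) []
      = PySem.Set.ofList ((rows.map (fun r => (PySem.Dict.mk r).get? "medicine_name")).filterMap pvKeep) := by
    rw [PySem.Set.ofList_eq_foldl]
    apply PySem.List.foldl_congr_mem
    intro acc x _
    by_cases hm : x ∈ acc <;> simp [PySem.Set.add, PySem.Set.contains, hm]
  rw [hseen]
  refine List.map_congr_left (fun x hx => ?_)
  have hxk : x ∈ (rows.map (fun r => (PySem.Dict.mk r).get? "medicine_name")).filterMap pvKeep := by
    simpa [PySem.Set.mem_ofList] using hx
  rw [pv_count_filt x (pv_mem_filt_ne _ x hxk)]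

-- ===== VERDICT (by name: the statement is the Claim_ definition above) =====
theorem order_count_by_medicine_py_spec : Claim_equal_order_count_by_medicine_py := by
  intro rows _
  exact pv_equiv rows
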